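-- pv_equiv track=rewrite | github.com/mainoramg/Complete-Python-3-Bootcamp | 00-mainor-playground/playground.py | old_macdonald
-- ===== SOURCE A (Python) =====
-- def old_macdonald(name):
--     result = ''
--     for i,letter in enumerate(name):
--         if i == 0 or i == 3:
--             result += letter.upper()
--         else:
--             result += letter.lower()
--     return result
-- ===== SOURCE B (Python) =====
-- def old_macdonald(name):
--     return name[:1].upper() + name[1:3].lower() + name[3:4].upper() + name[4:].lower()
-- ===== Notes on version B (the rewrite author's own statement) =====
-- stated objective: idiomatic
-- what changed: Replaces the per-character enumerate loop with a single closed-form expression built from four slices (name[:1], name[1:3], name[3:4], name[4:]) upper/lower-cased, which is safe on short strings.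
import Mathlib
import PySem

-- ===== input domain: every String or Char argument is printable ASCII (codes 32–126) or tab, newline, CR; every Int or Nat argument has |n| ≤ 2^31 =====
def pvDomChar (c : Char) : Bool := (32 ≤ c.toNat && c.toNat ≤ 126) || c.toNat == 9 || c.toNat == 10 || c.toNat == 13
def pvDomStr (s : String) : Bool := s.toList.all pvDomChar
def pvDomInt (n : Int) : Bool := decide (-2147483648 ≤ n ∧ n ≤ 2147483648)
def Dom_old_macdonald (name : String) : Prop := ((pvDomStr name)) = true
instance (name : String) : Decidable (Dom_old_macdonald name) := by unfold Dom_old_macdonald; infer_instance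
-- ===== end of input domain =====

-- B replaces A's enumerate loop with a closed-form expression built from four slices; idiomatic, same cost.

-- ===== PORT A =====
def old_macdonald (name : String) : String :=
  (PySem.List.enumerate name.toList).foldl
    (fun result p =>
      if p.1 == 0 || p.1 == 3 then result.push (PySem.Chars.upperChar p.2)
      else result.push (PySem.Chars.lowerChar p.2)) ""

-- ===== PORT B =====
def old_macdonald_alt (name : String) : String :=
  PySem.Str.upper (PySem.Str.slice name none (some 1)) ++
  PySem.Str.lower (PySem.Str.slice name (some 1) (some 3)) ++
  PySem.Str.upper (PySem.Str.slice name (some 3) (some 4)) ++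
  PySem.Str.lower (PySem.Str.slice name (some 4) none)

-- ===== PRECONDITION & SPEC =====
def Spec_old_macdonald (name : String) (out : String) : Prop := out = old_macdonald_alt name
instance (name : String) (out : String) : Decidable (Spec_old_macdonald name out) := by unfold Spec_old_macdonald; infer_instance

-- ===== CLAIM (what is proved, stated in full; the proofs are below) =====
def Claim_equal_old_macdonald : Prop := ∀ (name : String), Dom_old_macdonald name → Spec_old_macdonald name (old_macdonald name)

-- ===== LEMMAS AND PROOFS =====

def omStep (p : Int × Char) : Char :=
  if p.1 == 0 || p.1 == 3 then PySem.Chars.upperChar p.2 else PySem.Chars.lowerChar p.2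

-- A's loop, read on the character-list side: it is the map of omStep over the enumeration.
lemma om_fold_toList (xs : List Char) (s : Int) (acc : String) :
    ((PySem.List.enumerate xs s).foldl
      (fun result p =>
        if p.1 == 0 || p.1 == 3 then result.push (PySem.Chars.upperChar p.2)
        else result.push (PySem.Chars.lowerChar p.2)) acc).toList
      = acc.toList ++ (PySem.List.enumerate xs s).map omStep := by
  induction xs generalizing s acc with
  | nil => simp [PySem.List.enumerate_nil]
  | cons c cs ih =>
      rw [PySem.List.enumerate_cons]
      simp only [List.foldl_cons, List.map_cons]
      rw [ih]
      by_cases h : ((s == 0) || (s == 3)) = true <;>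
        simp [omStep, h]

-- indices ≥ 4 are never 0 or 3, so the tail is lower-cased throughout
lemma om_tail_map (xs : List Char) (s : Int) (hs : 4 ≤ s) :
    (PySem.List.enumerate xs s).map omStep = xs.map PySem.Chars.lowerChar := by
  induction xs generalizing s with
  | nil => simp [PySem.List.enumerate_nil]
  | cons c cs ih =>
      rw [PySem.List.enumerate_cons]
      have h0 : ((s == 0) || (s == 3)) = false := by
        simp only [Bool.or_eq_false_iff, beq_eq_false_iff_ne]
        omega
      simp only [List.map_cons, omStep, h0, if_false, Bool.false_eq_true]
      rw [ih (s + 1) (by omega)]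

-- ===== VERDICT (by name: the statement is the Claim_ definition above) =====
theorem old_macdonald_spec : Claim_equal_old_macdonald := by
  intro name _
  unfold Spec_old_macdonald
  apply String.toList_inj.mp
  unfold old_macdonald old_macdonald_alt
  rw [om_fold_toList]
  simp only [String.toList_append, PySem.Str.toList_upper, PySem.Str.toList_lower,
    PySem.Str.toList_slice, PySem.Chars.slice_eq_listSlice]
  rw [PySem.List.slice_to name.toList (by omega : (0:Int) ≤ 1),
    PySem.List.slice_toNat name.toList (by omega : (0:Int) ≤ 1) (by omega : (0:Int) ≤ 3),
    PySem.List.slice_toNat name.toList (by omega : (0:Int) ≤ 3) (by omega : (0:Int) ≤ 4),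
    PySem.List.slice_from name.toList (by omega : (0:Int) ≤ 4)]
  match h : name.toList with
  | [] => simp [PySem.List.enumerate_nil, PySem.Chars.upper, PySem.Chars.lower]
  | [c0] =>
      simp [PySem.List.enumerate_cons, PySem.List.enumerate_nil, omStep,
        PySem.Chars.upper, PySem.Chars.lower]
  | [c0, c1] =>
      simp [PySem.List.enumerate_cons, PySem.List.enumerate_nil, omStep,
        PySem.Chars.upper, PySem.Chars.lower]
  | [c0, c1, c2] =>
      simp [PySem.List.enumerate_cons, PySem.List.enumerate_nil, omStep,
        PySem.Chars.upper, PySem.Chars.lower]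
  | c0 :: c1 :: c2 :: c3 :: rest =>
      simp only [PySem.List.enumerate_cons, List.map_cons]
      rw [show (0:Int)+1+1+1+1 = 4 by norm_num, om_tail_map rest 4 (by omega)]
      simp [omStep, PySem.Chars.upper, PySem.Chars.lower]
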